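-- pv_equiv track=rewrite | github.com/Jonb1231/python-data-structures-and-algorithms | applications/warmup_challenges.py | missing_odds
-- ===== SOURCE A (Python) =====
-- def missing_odds(inputs: list[int]) -> int:
--     maximum = None
--     minimum = None
--     odd_sum_present = 0
--     for number in inputs:
--         if number % 2 != 0:
--             odd_sum_present += number
--         maximum = number if maximum is None or number > maximum else maximum
--         minimum = number if minimum is None or number < minimum else minimum
--
--     first_odd = minimum if minimum % 2 != 0 else minimum + 1
--     last_odd = maximum if maximum % 2 != 0 else maximum - 1
--     total_odd_sum = sum(range(first_odd, last_odd + 1, 2)) if first_odd <= last_odd else 0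
--     return total_odd_sum - odd_sum_present
-- ===== SOURCE B (Python) =====
-- def missing_odds(inputs: list[int]) -> int:
--     lo = min(inputs)
--     hi = max(inputs)
--     first = lo if lo % 2 != 0 else lo + 1
--     last = hi if hi % 2 != 0 else hi - 1
--     if first > last:
--         total = 0
--     else:
--         count = (last - first) // 2 + 1
--         total = count * (first + last) // 2
--     return total - sum(n for n in inputs if n % 2 != 0)
-- ===== Notes on version B (the rewrite author's own statement) =====
-- stated objective: alternative
-- what changed: Replaces A's element-by-element summation of range(first_odd,last_odd+1,2) by the closed-form arithmetic-series formula count*(first+last)//2, and A's hand-rolled running min/max/odd-sum loop by min(), max() and a generator sum.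
import Mathlib
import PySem

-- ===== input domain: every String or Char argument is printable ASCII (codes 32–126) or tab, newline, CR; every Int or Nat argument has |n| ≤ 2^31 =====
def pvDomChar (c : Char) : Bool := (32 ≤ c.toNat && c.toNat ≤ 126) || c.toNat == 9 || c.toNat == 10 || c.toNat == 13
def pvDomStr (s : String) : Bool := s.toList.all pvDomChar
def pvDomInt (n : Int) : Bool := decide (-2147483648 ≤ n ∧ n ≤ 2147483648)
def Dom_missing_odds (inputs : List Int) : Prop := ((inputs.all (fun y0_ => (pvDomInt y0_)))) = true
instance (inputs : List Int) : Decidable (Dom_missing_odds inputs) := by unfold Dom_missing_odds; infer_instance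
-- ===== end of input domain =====

-- B replaces A's summation over range(first_odd, last_odd+1, 2) by the closed-form
-- arithmetic-series formula and the hand-rolled min/max loop by min()/max() (objective: alternative).


-- ===== PORT A =====
-- loop state: (maximum, minimum, odd_sum_present)
def missing_odds (inputs : List Int) : Int :=
  let st := inputs.foldl
    (fun (s : Option Int × Option Int × Int) number =>
      let odd_sum := if PySem.Int.mod number 2 ≠ 0 then s.2.2 + number else s.2.2
      let maximum := match s.1 with
        | none => some number
        | some m => if number > m then some number else some m
      let minimum := match s.2.1 with
        | none => some number
        | some m => if number < m then some number else some m
      (maximum, minimum, odd_sum))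
    (none, none, 0)
  match st.2.1, st.1 with
  | some minimum, some maximum =>
    let first_odd := if PySem.Int.mod minimum 2 ≠ 0 then minimum else minimum + 1
    let last_odd := if PySem.Int.mod maximum 2 ≠ 0 then maximum else maximum - 1
    let total_odd_sum := if first_odd ≤ last_odd then
        (PySem.List.pyRange first_odd (last_odd + 1) 2).sum else 0
    total_odd_sum - st.2.2
  | _, _ => 0    -- unreachable: Pre_ requires inputs ≠ [] (Python raises TypeError on [])

-- ===== PORT B =====
def missing_odds_alt_core (inputs : List Int) (lo hi : Int) : Int :=
  let first := if PySem.Int.mod lo 2 ≠ 0 then lo else lo + 1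
  let last := if PySem.Int.mod hi 2 ≠ 0 then hi else hi - 1
  let total := if first > last then 0
    else
      let count := PySem.Int.floordiv (last - first) 2 + 1
      PySem.Int.floordiv (count * (first + last)) 2
  total - (inputs.filter (fun n => PySem.Int.mod n 2 != 0)).sum

def missing_odds_alt (inputs : List Int) : Int :=
  -- min()/max() raise ValueError on [] (excluded by Pre_), hence the Option plumbing
  ((PySem.List.min? inputs (fun y => y)).bind (fun lo =>
    (PySem.List.max? inputs (fun y => y)).map (fun hi =>
      missing_odds_alt_core inputs lo hi))).getD 0

-- ===== PRECONDITION & SPEC =====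
-- Pre_ excludes only the empty list, on which Python A raises TypeError (minimum is None).
def Pre_missing_odds (inputs : List Int) : Prop := inputs ≠ []
instance (inputs : List Int) : Decidable (Pre_missing_odds inputs) := by unfold Pre_missing_odds; infer_instance
def pvWitness_missing_odds : List Int := [2, 5, 9]
def Spec_missing_odds (inputs : List Int) (out : Int) : Prop := out = missing_odds_alt inputs
instance (inputs : List Int) (out : Int) : Decidable (Spec_missing_odds inputs out) := by unfold Spec_missing_odds; infer_instance

-- ===== CLAIM (what is proved, stated in full; the proofs are below) =====
def Claim_equal_missing_odds : Prop := ∀ (inputs : List Int), Dom_missing_odds inputs → Pre_missing_odds inputs → Spec_missing_odds inputs (missing_odds inputs)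

-- ===== LEMMAS AND PROOFS =====

-- A's loop, once both Options are populated, tracks the running max, the running min,
-- and the sum of the odd elements seen so far.
theorem missing_odds_loop (l : List Int) (a b s : Int) :
    l.foldl
      (fun (s : Option Int × Option Int × Int) number =>
        let odd_sum := if PySem.Int.mod number 2 ≠ 0 then s.2.2 + number else s.2.2
        let maximum := match s.1 with
          | none => some number
          | some m => if number > m then some number else some m
        let minimum := match s.2.1 with
          | none => some number
          | some m => if number < m then some number else some m
        (maximum, minimum, odd_sum))
      (some a, some b, s)
    = (some (l.foldl max a), some (l.foldl min b),
       s + (l.filter (fun n => PySem.Int.mod n 2 != 0)).sum) := by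
  induction l generalizing a b s with
  | nil => simp
  | cons n t ih =>
      simp only [List.foldl_cons]
      have hmax : (if n > a then some n else some a) = some (max a n) := by
        split_ifs with h <;> congr 1 <;> omega
      have hmin : (if n < b then some n else some b) = some (min b n) := by
        split_ifs with h <;> congr 1 <;> omega
      simp only [hmax, hmin, ih, List.filter_cons]
      by_cases hodd : PySem.Int.mod n 2 ≠ 0
      · have hb : (PySem.Int.mod n 2 != 0) = true := by simpa [bne_iff_ne] using hodd
        rw [if_pos hodd, if_pos hb, List.sum_cons]
        simp only [Prod.mk.injEq, true_and]
        ring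
      · have hb : ¬ ((PySem.Int.mod n 2 != 0) = true) := by simpa [bne_iff_ne] using hodd
        rw [if_neg hodd, if_neg hb]

-- closed form for the sum of the odd integers f, f+2, …, l (f, l odd, f ≤ l)
theorem sum_odd_range (f l : Int) (hf : ¬ (2 ∣ f)) (hl : ¬ (2 ∣ l)) (hle : f ≤ l) :
    (PySem.List.pyRange f (l + 1) 2).sum
      = PySem.Int.floordiv ((PySem.Int.floordiv (l - f) 2 + 1) * (f + l)) 2 := by
  obtain ⟨d, hd⟩ : 2 ∣ (l - f) := by omega
  have hd0 : 0 ≤ d := by omega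
  have hcount : ((l + 1 - f + 2 - 1) / 2).toNat = (d + 1).toNat := by
    have : l + 1 - f + 2 - 1 = 2 * (d + 1) := by omega
    rw [this, Int.mul_ediv_cancel_left _ (by norm_num)]
  have hrange := PySem.List.pyRange_of_pos f (l + 1) (s := 2) (by norm_num)
  rw [hrange, if_pos (by omega : f < l + 1), hcount]
  -- sum of the arithmetic progression, by induction on the length
  have harith : ∀ (N : ℕ) (a : Int),
      (List.map (fun (k : ℕ) => a + 2 * (k : Int)) (List.range N)).sum
        = (N : Int) * a + (N : Int) * ((N : Int) - 1) := by
    intro N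
    induction N with
    | zero => intro a; simp
    | succ m ih =>
        intro a
        rw [List.range_succ, List.map_append, List.sum_append, ih]
        push_cast
        simp
        ring
  rw [harith]
  have h1 : PySem.Int.floordiv (l - f) 2 = d := by
    rw [PySem.Int.floordiv_eq_ediv_of_pos (by norm_num : (0:Int) < 2), hd,
      Int.mul_ediv_cancel_left _ (by norm_num)]
  have h2 : (d + 1) * (f + l) = 2 * ((d + 1) * (f + d)) := by
    have : l = f + 2 * d := by omega
    rw [this]; ring
  rw [h1, h2, PySem.Int.floordiv_eq_ediv_of_pos (by norm_num : (0:Int) < 2),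
    Int.mul_ediv_cancel_left _ (by norm_num)]
  have h3 : (((d + 1).toNat : Int)) = d + 1 := by omega
  rw [h3]; ring

-- ===== VERDICT (by name: the statement is the Claim_ definition above) =====
theorem missing_odds_spec : Claim_equal_missing_odds := by
  intro inputs _ hpre
  unfold Spec_missing_odds
  cases inputs with
  | nil => exact absurd rfl hpre
  | cons x xs =>
      unfold missing_odds missing_odds_alt
      rw [PySem.List.min?_id_cons, PySem.List.max?_id_cons]
      simp only [List.foldl_cons]
      rw [missing_odds_loop]
      dsimp only
      set hi := xs.foldl max x with hhi
      set lo := xs.foldl min x with hlo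
      set first := if PySem.Int.mod lo 2 ≠ 0 then lo else lo + 1 with hfirst
      set last := if PySem.Int.mod hi 2 ≠ 0 then hi else hi - 1 with hlast
      have hfodd : ¬ (2 ∣ first) := by
        have hm := PySem.Int.mod_eq_zero_iff_dvd lo 2
        rw [hfirst]
        split_ifs with h
        · exact fun hdvd => h (hm.mpr hdvd)
        · have : 2 ∣ lo := hm.mp (not_not.mp h)
          omega
      have hlodd : ¬ (2 ∣ last) := by
        have hm := PySem.Int.mod_eq_zero_iff_dvd hi 2
        rw [hlast]
        split_ifs with h
        · exact fun hdvd => h (hm.mpr hdvd)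
        · have : 2 ∣ hi := hm.mp (not_not.mp h)
          omega
      have hsum : (if PySem.Int.mod x 2 ≠ 0 then (0 : Int) + x else 0)
            + (xs.filter (fun n => PySem.Int.mod n 2 != 0)).sum
          = (if (PySem.Int.mod x 2 != 0) = true
              then x :: xs.filter (fun n => PySem.Int.mod n 2 != 0)
              else xs.filter (fun n => PySem.Int.mod n 2 != 0)).sum := by
        by_cases h : PySem.Int.mod x 2 ≠ 0
        · rw [if_pos h, if_pos (by simpa [bne_iff_ne] using h), List.sum_cons]
          omega
        · rw [if_neg h, if_neg (by simpa [bne_iff_ne] using h)]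
          omega
      simp only [Option.bind_some, Option.map_some, Option.getD_some]
      unfold missing_odds_alt_core
      simp only [List.filter_cons]
      rw [← hfirst, ← hlast, ← hsum]
      congr 1
      by_cases hle : first ≤ last
      · rw [if_pos hle, if_neg (not_lt.mpr hle)]
        exact sum_odd_range first last hfodd hlodd hle
      · rw [if_neg hle, if_pos (lt_of_not_ge hle)]
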